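-- pv_equiv track=rewrite | github.com/nicelyiswell/ProjectPython-by-nite-fe | Week10/10E.py | is_same_bracelet
-- ===== SOURCE A (Python) =====
-- def rotate_string(s):
--     """Generate all rotations of a given string."""
--     return [s[i:] + s[:i] for i in range(len(s))]
--
-- def is_same_bracelet(s1, s2):
--     """Check if two sequences represent the same bracelet design."""
--     # Check if the sequences are already the same
--     if s1 == s2:
--         return True
--     # Check rotational symmetry
--     for rotated_s1 in rotate_string(s1):
--         if rotated_s1 == s2:
--             return True
--     # Check reflective symmetry
--     reversed_s1 = s1[::-1]
--     for rotated_s1 in rotate_string(reversed_s1):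
--         if rotated_s1 == s2:
--             return True
--     return False
-- ===== SOURCE B (Python) =====
-- def is_same_bracelet(s1, s2):
--     if len(s1) != len(s2):
--         return False
--     r = s1[::-1]
--     return s2 in s1 + s1 or s2 in r + r
-- ===== Notes on version B (the rewrite author's own statement) =====
-- stated objective: faster
-- what changed: Instead of generating every rotation of s1 and of reversed(s1) and comparing each to s2 (quadratic), B uses an equal-length guard plus the classic doubled-string trick: s2 is a rotation of s1 iff len matches and s2 is a substring of s1+s1 (and likewise for the reversal), using Python's linear substring search.
import Mathlib
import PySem

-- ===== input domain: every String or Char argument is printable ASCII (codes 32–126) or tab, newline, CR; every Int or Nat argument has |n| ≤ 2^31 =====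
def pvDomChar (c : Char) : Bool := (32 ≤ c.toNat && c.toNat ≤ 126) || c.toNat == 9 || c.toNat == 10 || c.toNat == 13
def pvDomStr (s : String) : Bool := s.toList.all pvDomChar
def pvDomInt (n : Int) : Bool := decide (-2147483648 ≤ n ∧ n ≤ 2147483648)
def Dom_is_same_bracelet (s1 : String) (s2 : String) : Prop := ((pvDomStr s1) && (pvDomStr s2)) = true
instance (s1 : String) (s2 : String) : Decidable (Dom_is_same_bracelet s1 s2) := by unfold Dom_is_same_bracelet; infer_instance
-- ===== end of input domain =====

-- B replaces A's explicit generate-all-rotations scans by the doubled-string trick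
-- (equal length + substring of s1+s1 / of reversed(s1)+reversed(s1)): asymptotically faster.

-- ===== PORT A =====
-- rotate_string(s) = [s[i:] + s[:i] for i in range(len(s))]
def rotate_string (s : List Char) : List (List Char) :=
  (PySem.List.pyRange 0 (s.length : Int) 1).map
    (fun i => PySem.List.slice s (some i) none ++ PySem.List.slice s none (some i))

def is_same_bracelet (s1 : String) (s2 : String) : Bool :=
  if s1.toList = s2.toList then true
  else if (rotate_string s1.toList).any (fun r => r == s2.toList) then true
  else
    -- s1[::-1]: a step of -1 never raises, so the slice? option is always some
    let reversed_s1 := (PySem.List.slice? s1.toList none none (-1)).getD []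
    if (rotate_string reversed_s1).any (fun r => r == s2.toList) then true
    else false

-- ===== PORT B =====
def is_same_bracelet_alt (s1 : String) (s2 : String) : Bool :=
  if s1.toList.length ≠ s2.toList.length then false
  else
    let r := s1.toList.reverse
    PySem.Chars.isIn s2.toList (s1.toList ++ s1.toList) || PySem.Chars.isIn s2.toList (r ++ r)

-- ===== PRECONDITION & SPEC =====
def Spec_is_same_bracelet (s1 : String) (s2 : String) (out : Bool) : Prop := out = is_same_bracelet_alt s1 s2
instance (s1 : String) (s2 : String) (out : Bool) : Decidable (Spec_is_same_bracelet s1 s2 out) := by unfold Spec_is_same_bracelet; infer_instance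

-- ===== CLAIM (what is proved, stated in full; the proofs are below) =====
def Claim_equal_is_same_bracelet : Prop := ∀ (s1 : String) (s2 : String), Dom_is_same_bracelet s1 s2 → Spec_is_same_bracelet s1 s2 (is_same_bracelet s1 s2)

-- ===== LEMMAS AND PROOFS =====

-- A's rotation scan succeeds iff some index-i rotation of l equals t.
lemma any_rot_iff (l t : List Char) :
    ((rotate_string l).any (fun r => r == t) = true) ↔
      ∃ i : Nat, i < l.length ∧ l.drop i ++ l.take i = t := by
  simp only [rotate_string, List.any_map, List.any_eq_true, Function.comp,
    beq_iff_eq, PySem.List.mem_pyRange_one]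
  constructor
  · rintro ⟨i, ⟨h0, hn⟩, hi⟩
    refine ⟨i.toNat, by omega, ?_⟩
    rw [show i = ((i.toNat : Nat) : Int) by omega] at hi
    rwa [PySem.List.slice_from_natCast, PySem.List.slice_to_natCast] at hi
  · rintro ⟨i, hi, ht⟩
    exact ⟨(i : Int), ⟨by positivity, by exact_mod_cast hi⟩,
      by rw [PySem.List.slice_from_natCast, PySem.List.slice_to_natCast]; exact ht⟩

lemma prefix_append_left (l t u : List Char) (h : t <+: u) : l ++ t <+: l ++ u := by
  obtain ⟨r, hr⟩ := h; exact ⟨r, by rw [List.append_assoc, hr]⟩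

-- core bracelet fact: for equal lengths, 't occurs in l ++ l' ↔ 't is l or a rotation of l'
lemma rot_iff_exists_prefix (l t : List Char) (hlen : l.length = t.length) :
    (∃ j : Nat, t <+: (l ++ l).drop j) ↔
      (l = t ∨ ∃ i : Nat, i < l.length ∧ l.drop i ++ l.take i = t) := by
  constructor
  · rintro ⟨j, hj⟩
    rcases Nat.eq_zero_or_pos l.length with hn | hn
    · left
      have ht : t = [] := List.eq_nil_of_length_eq_zero (by omega)
      have hl : l = [] := List.eq_nil_of_length_eq_zero hn
      rw [hl, ht]
    · have hjle : j ≤ l.length := by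
        have := hj.length_le
        simp only [List.length_drop, List.length_append] at this
        omega
      rw [List.drop_append_of_le_length hjle] at hj
      have ht : t = (l.drop j ++ l).take t.length := by
        obtain ⟨r, hr⟩ := hj
        rw [← hr, List.take_left]
      rw [List.take_append] at ht
      have h1 : (l.drop j).take t.length = l.drop j := by
        apply List.take_of_length_le; simp; omega
      have h2 : t.length - (l.drop j).length = j := by simp; omega
      rw [h1, h2] at ht
      rcases Nat.lt_or_ge j l.length with hlt | hge
      · exact Or.inr ⟨j, hlt, ht.symm⟩
      · left
        have hje : j = l.length := le_antisymm hjle hge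
        rw [hje, List.drop_length, List.take_length] at ht
        simpa using ht.symm
  · rintro (rfl | ⟨i, hi, rfl⟩)
    · exact ⟨0, ⟨l, by simp⟩⟩
    · refine ⟨i, ?_⟩
      rw [List.drop_append_of_le_length (le_of_lt hi)]
      exact prefix_append_left _ _ _ (List.take_prefix i l)

-- Bool-level characterization of port A: flatten the early-return chain into a disjunction
lemma charA (s1 s2 : String) : is_same_bracelet s1 s2 = true ↔
    (s1.toList = s2.toList ∨
     (rotate_string s1.toList).any (fun r => r == s2.toList) = true ∨
     (rotate_string s1.toList.reverse).any (fun r => r == s2.toList) = true) := by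
  unfold is_same_bracelet
  simp only [PySem.List.slice?_none_none_neg_one, Option.getD_some]
  split_ifs with h1 h2 h3 <;> simp_all

-- Bool-level characterization of port B
lemma charB (s1 s2 : String) : is_same_bracelet_alt s1 s2 = true ↔
    (s1.toList.length = s2.toList.length ∧
      (PySem.Chars.isIn s2.toList (s1.toList ++ s1.toList) = true ∨
       PySem.Chars.isIn s2.toList (s1.toList.reverse ++ s1.toList.reverse) = true)) := by
  unfold is_same_bracelet_alt
  split_ifs with h <;> simp_all

-- a rotation of l has l's length
lemma rot_length (l : List Char) (i : Nat) (hi : i < l.length) :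
    (l.drop i ++ l.take i).length = l.length := by
  simp; omega

theorem is_same_bracelet_spec : Claim_equal_is_same_bracelet := by
  intro s1 s2 _
  unfold Spec_is_same_bracelet
  rw [Bool.eq_iff_iff, charA, charB, any_rot_iff, any_rot_iff]
  by_cases hlen : s1.toList.length = s2.toList.length
  · rw [← PySem.Chars.exists_prefix_drop_iff_isIn, ← PySem.Chars.exists_prefix_drop_iff_isIn,
      rot_iff_exists_prefix _ _ hlen, rot_iff_exists_prefix _ _ (by simpa using hlen)]
    constructor
    · rintro (h | h | h)
      · exact ⟨hlen, Or.inl (Or.inl h)⟩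
      · exact ⟨hlen, Or.inl (Or.inr h)⟩
      · exact ⟨hlen, Or.inr (Or.inr h)⟩
    · rintro ⟨-, (h | h) | (h | h)⟩
      · exact Or.inl h
      · exact Or.inr (Or.inl h)
      · -- reversed(l1) = l2: if l1 = [] then l1 = l2, else it is the i = 0 rotation of the reversal
        rcases Nat.eq_zero_or_pos s1.toList.length with h0 | h0
        · left
          rw [List.eq_nil_of_length_eq_zero h0] at h ⊢
          exact (List.eq_nil_of_length_eq_zero (by omega)).symm
        · exact Or.inr (Or.inr ⟨0, by simpa using h0, by simpa using h⟩)
      · exact Or.inr (Or.inr h)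
  · constructor
    · rintro (h | ⟨i, hi, h⟩ | ⟨i, hi, h⟩)
      · exact absurd (congrArg List.length h) hlen
      · exact absurd (by rw [← h]; exact (rot_length _ _ hi).symm) hlen
      · refine absurd ?_ hlen
        have := rot_length _ _ hi
        rw [h] at this
        simpa using this.symm
    · rintro ⟨h, -⟩; exact absurd h hlen
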